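-- pv_equiv track=rewrite | github.com/herculesvanso/runge-kutta-ode | rungekutta.py | dxdts
-- ===== SOURCE A (Python) =====
-- def dxdts(n):
--     if n == 0:
--         return 't'
--     else:
--         str_dxdts = ''
--     for i in range(n):
--         dxdt = ''
--         for j in range(i):
--             dxdt += 'd/dt '
--         str_dxdts += dxdt
--     return str_dxdts + 'x'
-- ===== SOURCE B (Python) =====
-- def dxdts(n):
--     if n == 0:
--         return 't'
--     count = n * (n - 1) // 2 if n > 0 else 0
--     return 'd/dt ' * count + 'x'
-- ===== Notes on version B (the rewrite author's own statement) =====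
-- stated objective: simpler
-- what changed: Replaces the nested accumulation loops by a closed form: the loops emit the derivative token a triangular-number count of times, so B multiplies the token string by that count (zero for non-positive n, matching the empty range) and appends the variable name.
import Mathlib
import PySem

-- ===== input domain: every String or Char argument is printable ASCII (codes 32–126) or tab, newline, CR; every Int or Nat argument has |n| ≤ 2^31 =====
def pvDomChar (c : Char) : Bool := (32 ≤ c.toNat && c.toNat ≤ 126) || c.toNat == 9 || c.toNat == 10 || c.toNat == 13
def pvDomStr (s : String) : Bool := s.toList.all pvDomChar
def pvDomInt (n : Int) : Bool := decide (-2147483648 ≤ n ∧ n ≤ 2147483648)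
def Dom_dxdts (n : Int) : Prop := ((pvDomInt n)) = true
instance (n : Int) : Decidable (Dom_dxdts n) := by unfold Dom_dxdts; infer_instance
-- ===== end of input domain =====

-- B replaces A's nested accumulation loops by the closed-form count n*(n-1)//2 of 'd/dt ' pieces (simpler).

-- ===== PORT A =====
def dxdts (n : Int) : String :=
  if n == 0 then "t"
  else
    let str_dxdts :=
      (PySem.List.pyRange 0 n 1).foldl (fun str_dxdts i =>
        let dxdt := (PySem.List.pyRange 0 i 1).foldl (fun dxdt _ => dxdt ++ "d/dt ") ""
        str_dxdts ++ dxdt) ""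
    str_dxdts ++ "x"

-- ===== PORT B =====
def dxdts_alt (n : Int) : String :=
  if n == 0 then "t"
  else
    let count : Int := if n > 0 then PySem.Int.floordiv (n * (n - 1)) 2 else 0
    String.join (List.replicate count.toNat "d/dt ") ++ "x"

-- ===== PRECONDITION & SPEC =====
def Spec_dxdts (n : Int) (out : String) : Prop := out = dxdts_alt n
instance (n : Int) (out : String) : Decidable (Spec_dxdts n out) := by unfold Spec_dxdts; infer_instance

-- ===== CLAIM (what is proved, stated in full; the proofs are below) =====
def Claim_equal_dxdts : Prop := ∀ (n : Int), Dom_dxdts n → Spec_dxdts n (dxdts n)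

-- ===== LEMMAS AND PROOFS =====

theorem join_replicate_succ (m : Nat) (s : String) :
    String.join (List.replicate (m + 1) s) = String.join (List.replicate m s) ++ s := by
  rw [List.replicate_succ', String.join, String.join, List.foldl_append, List.foldl_cons,
    List.foldl_nil]

-- inner loop: appending 'd/dt ' m times to s
theorem inner_loop (m : Nat) (s : String) :
    (PySem.List.pyRange 0 (m : Int) 1).foldl (fun d _ => d ++ "d/dt ") s
      = s ++ String.join (List.replicate m "d/dt ") := by
  induction m generalizing s with
  | zero => simp [PySem.List.pyRange_one_eq_nil, String.join]
  | succ k ih =>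
      have h : PySem.List.pyRange 0 ((k : Int) + 1) 1
          = PySem.List.pyRange 0 (k : Int) 1 ++ [(k : Int)] := by
        exact PySem.List.pyRange_one_succ_right (by exact_mod_cast Nat.zero_le k)
      push_cast
      rw [h, List.foldl_append, ih]
      simp [join_replicate_succ, String.append_assoc]

theorem join_replicate_add (a b : Nat) (s : String) :
    String.join (List.replicate (a + b) s)
      = String.join (List.replicate a s) ++ String.join (List.replicate b s) := by
  induction b with
  | zero => simp [String.join]
  | succ k ih =>
      rw [show a + (k + 1) = (a + k) + 1 by omega, join_replicate_succ, ih,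
        join_replicate_succ, String.append_assoc]

theorem tri_step (k : Nat) : k * (k - 1) / 2 + k = (k + 1) * k / 2 := by
  cases k with
  | zero => rfl
  | succ j =>
      have h : (j + 2) * (j + 1) = (j + 1) * j + (j + 1) * 2 := by ring
      rw [Nat.add_sub_cancel, h, Nat.add_mul_div_right _ _ (by norm_num)]

theorem outer_loop (m : Nat) :
    (PySem.List.pyRange 0 (m : Int) 1).foldl (fun acc i =>
        acc ++ (PySem.List.pyRange 0 i 1).foldl (fun d _ => d ++ "d/dt ") "") ""
      = String.join (List.replicate (m * (m - 1) / 2) "d/dt ") := by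
  induction m with
  | zero => simp [PySem.List.pyRange_one_eq_nil, String.join]
  | succ k ih =>
      have h : PySem.List.pyRange 0 ((k : Int) + 1) 1
          = PySem.List.pyRange 0 (k : Int) 1 ++ [(k : Int)] := by
        exact PySem.List.pyRange_one_succ_right (by exact_mod_cast Nat.zero_le k)
      push_cast
      rw [h, List.foldl_append, ih, List.foldl_cons, List.foldl_nil, inner_loop,
        String.empty_append, ← join_replicate_add, tri_step]

-- ===== VERDICT (by name: the statement is the Claim_ definition above) =====
theorem dxdts_spec : Claim_equal_dxdts := by
  intro n _
  unfold Spec_dxdts dxdts dxdts_alt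
  by_cases h0 : n = 0
  · simp [h0]
  · simp only [beq_iff_eq, h0, if_false]
    by_cases hp : 0 < n
    · have hm : n = (n.toNat : Int) := (Int.toNat_of_nonneg (le_of_lt hp)).symm
      have hm1 : 1 ≤ n.toNat := by omega
      rw [hm, outer_loop]
      have hgt : (0:Int) < (n.toNat : Int) := by rw [← hm]; exact hp
      rw [if_pos hgt]
      have h1 : (n.toNat : Int) * ((n.toNat : Int) - 1)
          = ((n.toNat * (n.toNat - 1) : Nat) : Int) := by
        push_cast [Nat.cast_sub hm1]
        ring
      have hcount : (PySem.Int.floordiv ((n.toNat : Int) * ((n.toNat : Int) - 1)) 2).toNat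
          = n.toNat * (n.toNat - 1) / 2 := by
        rw [PySem.Int.floordiv, h1, Int.fdiv_eq_ediv, if_pos (Or.inl (by norm_num))]
        omega
      rw [hcount]
    · have hneg : n ≤ 0 := le_of_not_gt hp
      rw [PySem.List.pyRange_one_eq_nil hneg]
      simp [hp, String.join]
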